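-- pv_equiv track=rewrite | github.com/csirlin/OpenTGPTPU | runtpu.py | make_tile
-- ===== SOURCE A (Python) =====
-- def make_tile(value, bitwidth, matsize):
--     tile = [[0] * matsize for _ in range(matsize)]
--     mask = int('1'*bitwidth, 2)
--     for i in range(matsize-1, -1, -1):
--         for j in range(matsize-1, -1, -1):
--             tile[i][j] = value & mask
--             value = value >> bitwidth
--     return tile
-- ===== SOURCE B (Python) =====
-- def make_tile(value, bitwidth, matsize):
--     mask = int('1' * bitwidth, 2)
--     return [[(value >> (((matsize - 1 - i) * matsize + (matsize - 1 - j)) * bitwidth)) & mask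
--              for j in range(matsize)]
--             for i in range(matsize)]
-- ===== Notes on version B (the rewrite author's own statement) =====
-- stated objective: alternative
-- what changed: B drops A's mutating running shift of `value` and the backward in-place writes into a preallocated tile; each cell's bit offset is computed directly from its position and the tile is built forward by a comprehension.
import Mathlib
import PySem

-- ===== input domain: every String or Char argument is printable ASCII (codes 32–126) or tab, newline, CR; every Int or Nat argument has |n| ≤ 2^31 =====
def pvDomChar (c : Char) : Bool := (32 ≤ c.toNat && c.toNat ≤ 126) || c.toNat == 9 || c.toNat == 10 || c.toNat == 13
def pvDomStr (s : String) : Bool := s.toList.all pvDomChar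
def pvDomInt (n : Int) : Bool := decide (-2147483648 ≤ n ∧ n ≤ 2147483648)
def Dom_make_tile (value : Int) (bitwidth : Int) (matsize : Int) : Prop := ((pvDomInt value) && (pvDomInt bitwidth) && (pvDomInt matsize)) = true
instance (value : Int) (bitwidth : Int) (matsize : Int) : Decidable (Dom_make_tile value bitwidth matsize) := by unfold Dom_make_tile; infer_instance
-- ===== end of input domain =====

-- B replaces A's mutating running shift and backward in-place writes with a direct
-- per-cell bit offset and a forward comprehension (alternative decomposition, same cost).

-- ===== PORT A =====
-- tile = [[0]*matsize for _ in range(matsize)]; mask = int('1'*bitwidth, 2);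
-- for i in range(matsize-1,-1,-1): for j in range(matsize-1,-1,-1):
--   tile[i][j] = value & mask; value = value >> bitwidth
-- int('1'*bitwidth, 2) = 2^bitwidth - 1, exact for bitwidth ≥ 1 (Pre_; raises otherwise).
-- Loop indices produced by range are nonnegative here, so `.toNat` is exact; the row
-- read tile[i] uses getD [] (always in range).
def make_tile (value : Int) (bitwidth : Int) (matsize : Int) : List (List Int) :=
  let tile : List (List Int) := List.replicate matsize.toNat (List.replicate matsize.toNat 0)
  let mask : Int := 2 ^ bitwidth.toNat - 1
  let st : List (List Int) × Int :=
    (PySem.List.pyRange (matsize - 1) (-1) (-1)).foldl (fun st i =>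
      (PySem.List.pyRange (matsize - 1) (-1) (-1)).foldl (fun st j =>
        (st.1.set i.toNat ((st.1.getD i.toNat []).set j.toNat (PySem.Int.band st.2 mask)),
         st.2 >>> bitwidth.toNat)) st) (tile, value)
  st.1

-- ===== PORT B =====
-- mask = int('1'*bitwidth, 2) = 2^bitwidth - 1 (exact for bitwidth ≥ 1, Pre_);
-- [[(value >> (((matsize-1-i)*matsize + (matsize-1-j))*bitwidth)) & mask
--   for j in range(matsize)] for i in range(matsize)]
-- The shift amount is nonnegative for every i, j in range, so `.toNat` is exact.
def make_tile_alt (value : Int) (bitwidth : Int) (matsize : Int) : List (List Int) :=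
  let mask : Int := 2 ^ bitwidth.toNat - 1
  (PySem.List.pyRange 0 matsize 1).map (fun i =>
    (PySem.List.pyRange 0 matsize 1).map (fun j =>
      PySem.Int.band
        (value >>> (((matsize - 1 - i) * matsize + (matsize - 1 - j)) * bitwidth).toNat)
        mask))

-- ===== PRECONDITION & SPEC =====
-- Pre_ excludes bitwidth ≤ 0, where A (and B) raise ValueError in int('1'*bitwidth, 2).
def Pre_make_tile (value : Int) (bitwidth : Int) (matsize : Int) : Prop := 1 ≤ bitwidth
instance (value : Int) (bitwidth : Int) (matsize : Int) : Decidable (Pre_make_tile value bitwidth matsize) := by unfold Pre_make_tile; infer_instance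
def pvWitness_make_tile : Int × Int × Int := (157, 4, 2)

def Spec_make_tile (value : Int) (bitwidth : Int) (matsize : Int) (out : List (List Int)) : Prop := out = make_tile_alt value bitwidth matsize
instance (value : Int) (bitwidth : Int) (matsize : Int) (out : List (List Int)) : Decidable (Spec_make_tile value bitwidth matsize out) := by unfold Spec_make_tile; infer_instance

-- ===== CLAIM (what is proved, stated in full; the proofs are below) =====
def Claim_equal_make_tile : Prop := ∀ (value : Int) (bitwidth : Int) (matsize : Int), Dom_make_tile value bitwidth matsize → Pre_make_tile value bitwidth matsize → Spec_make_tile value bitwidth matsize (make_tile value bitwidth matsize)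

-- ===== LEMMAS AND PROOFS =====

-- `pvRevFill m F base n` writes `F k` into slot `m-1-k` for k = 0,…,n-1 (the shape of
-- both of A's backward loops).
def pvRevFill {α : Type} (m : Nat) (F : Nat → α) (base : List α) (n : Nat) : List α :=
  (List.range n).foldl (fun l k => l.set (m - 1 - k) (F k)) base

theorem pvRevFill_succ {α : Type} (m : Nat) (F : Nat → α) (base : List α) (n : Nat) :
    pvRevFill m F base (n + 1) = (pvRevFill m F base n).set (m - 1 - n) (F n) := by
  simp [pvRevFill, List.range_succ]

theorem pvRevFill_length {α : Type} (m : Nat) (F : Nat → α) (base : List α) (n : Nat) :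
    (pvRevFill m F base n).length = base.length := by
  induction n with
  | zero => rfl
  | succ n ih => rw [pvRevFill_succ, List.length_set, ih]

theorem pvRevFill_getElem {α : Type} (m : Nat) (F : Nat → α) (base : List α) (n : Nat)
    (hbase : base.length = m) (hn : n ≤ m) (j : Nat) (hj : j < m)
    (h2 : j < (pvRevFill m F base n).length) :
    (pvRevFill m F base n)[j] =
      if m - n ≤ j then F (m - 1 - j) else base[j]'(by omega) := by
  induction n with
  | zero =>
      simp only [pvRevFill, List.range_zero, List.foldl_nil]
      rw [if_neg (by omega)]
  | succ n ih =>
      have hsucc := pvRevFill_succ m F base n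
      rw [List.getElem_of_eq hsucc, List.getElem_set]
      by_cases hij : m - 1 - n = j
      · have h1 : m - (n + 1) ≤ j := by omega
        have h2' : m - 1 - j = n := by omega
        simp [hij, h1, h2']
      · rw [if_neg hij, ih (by omega) (by rw [hsucc] at h2; simpa [pvRevFill_length] using h2)]
        split_ifs with hA hB hB
        · rfl
        · omega
        · omega
        · rfl

theorem pvRevFill_full {α : Type} (m : Nat) (F : Nat → α) (base : List α)
    (hbase : base.length = m) :
    pvRevFill m F base m = (List.range m).map (fun j => F (m - 1 - j)) := by
  apply List.ext_getElem
  · rw [pvRevFill_length, hbase, List.length_map, List.length_range]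
  · intro j h1 h2
    have hj : j < m := by rwa [pvRevFill_length, hbase] at h1
    rw [pvRevFill_getElem m F base m hbase le_rfl j hj h1]
    simp

-- the body of A's inner loop, with the (nonnegative) indices already in Nat form
def pvInnerStep (bw : Nat) (mask : Int) (iN m : Nat)
    (st : List (List Int) × Int) (k : Nat) : List (List Int) × Int :=
  (st.1.set iN ((st.1.getD iN []).set (m - 1 - k) (PySem.Int.band st.2 mask)), st.2 >>> bw)

theorem pvInner_eq (bw : Nat) (mask : Int) (iN m : Nat) (t : List (List Int)) (v : Int)
    (ht : iN < t.length) (n : Nat) :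
    (List.range n).foldl (pvInnerStep bw mask iN m) (t, v) =
      (t.set iN (pvRevFill m (fun k => PySem.Int.band (v >>> (k * bw)) mask) (t.getD iN []) n),
       v >>> (n * bw)) := by
  induction n with
  | zero =>
      refine Prod.ext ?_ ?_
      · show t = t.set iN (pvRevFill m _ (t.getD iN []) 0)
        show t = t.set iN (t.getD iN [])
        rw [List.getD_eq_getElem t [] ht, List.set_getElem_self]
      · show v = v >>> (0 * bw)
        simp
  | succ n ih =>
      rw [List.range_succ, List.foldl_append, ih, List.foldl_cons, List.foldl_nil]
      unfold pvInnerStep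
      have hlen : iN < (t.set iN (pvRevFill m (fun k => PySem.Int.band (v >>> (k * bw)) mask)
          (t.getD iN []) n)).length := by simpa using ht
      rw [List.getD_eq_getElem _ [] hlen, List.getElem_set_self, List.set_set,
        ← pvRevFill_succ]
      have hsh : v >>> (n * bw) >>> bw = v >>> ((n + 1) * bw) := by
        rw [← Int.shiftRight_add]; ring_nf
      rw [hsh]

-- the row written by one full pass of the inner loop, entering with the shifted value
def pvRowF (value : Int) (bw m : Nat) (mask : Int) (k : Nat) : List Int :=
  (List.range m).map
    (fun j => PySem.Int.band (value >>> (k * (m * bw)) >>> ((m - 1 - j) * bw)) mask)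

theorem pvRowF_length (value : Int) (bw m : Nat) (mask : Int) (k : Nat) :
    (pvRowF value bw m mask k).length = m := by simp [pvRowF]

theorem pvOuter_rows_len (value : Int) (bw m : Nat) (mask : Int) (t0 : List (List Int))
    (h0 : ∀ r ∈ t0, r.length = m) (n : Nat) :
    ∀ r ∈ pvRevFill m (pvRowF value bw m mask) t0 n, r.length = m := by
  induction n with
  | zero => exact h0
  | succ n ih =>
      intro r hr
      rw [pvRevFill_succ] at hr
      rcases List.mem_or_eq_of_mem_set hr with h | h
      · exact ih r h
      · rw [h]; exact pvRowF_length value bw m mask n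

theorem pvOuter_eq (value : Int) (bw m : Nat) (mask : Int) (t0 : List (List Int))
    (hlen : t0.length = m) (h0 : ∀ r ∈ t0, r.length = m) (n : Nat) (hn : n ≤ m) :
    (List.range n).foldl
        (fun st k => (List.range m).foldl (pvInnerStep bw mask (m - 1 - k) m) st) (t0, value) =
      (pvRevFill m (pvRowF value bw m mask) t0 n, value >>> (n * (m * bw))) := by
  induction n with
  | zero => simp [pvRevFill]
  | succ n ih =>
      rw [List.range_succ, List.foldl_append, ih (by omega), List.foldl_cons, List.foldl_nil]
      have hTlen : m - 1 - n <
          (pvRevFill m (pvRowF value bw m mask) t0 n).length := by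
        rw [pvRevFill_length, hlen]; omega
      rw [pvInner_eq bw mask (m - 1 - n) m _ (value >>> (n * (m * bw))) hTlen m]
      have hrow : ((pvRevFill m (pvRowF value bw m mask) t0 n).getD (m - 1 - n) []).length = m := by
        apply pvOuter_rows_len value bw m mask t0 h0 n
        rw [List.getD_eq_getElem _ [] hTlen]
        exact List.getElem_mem hTlen
      rw [pvRevFill_full m _ _ hrow]
      refine Prod.ext ?_ ?_
      · rw [pvRevFill_succ]
        rfl
      · show value >>> (n * (m * bw)) >>> (m * bw) = value >>> ((n + 1) * (m * bw))
        rw [← Int.shiftRight_add]; ring_nf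

theorem make_tile_eq_alt (value bitwidth matsize : Int) (hb : 1 ≤ bitwidth) :
    make_tile value bitwidth matsize = make_tile_alt value bitwidth matsize := by
  by_cases hm : matsize ≤ 0
  · have h0 : matsize.toNat = 0 := by omega
    have hr : (matsize - 1 - (-1)) = matsize := by ring
    simp [make_tile, make_tile_alt, PySem.List.pyRange_neg_one, PySem.List.pyRange_zero,
      hr, h0]
  · 
    set m := matsize.toNat with hmdef
    have hms : matsize = (m : Int) := by omega
    set bw := bitwidth.toNat with hbwdef
    have hbs : bitwidth = (bw : Int) := by omega
    set mask : Int := 2 ^ bw - 1 with hmask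
    set t0 : List (List Int) := List.replicate m (List.replicate m 0) with ht0
    have hr : (matsize - 1 - (-1)) = matsize := by ring
    have hA : make_tile value bitwidth matsize =
        ((List.range m).foldl
          (fun st k => (List.range m).foldl (pvInnerStep bw mask (m - 1 - k) m) st)
          (t0, value)).1 := by
      simp only [make_tile]
      rw [PySem.List.pyRange_neg_one, hr, List.foldl_map]
      congr 1
      apply PySem.List.foldl_congr_mem
      intro acc k hk
      rw [List.mem_range] at hk
      rw [List.foldl_map]
      apply PySem.List.foldl_congr_mem
      intro acc' k' hkk
      rw [List.mem_range] at hkk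
      unfold pvInnerStep
      have e1 : (matsize - 1 - (k : Int)).toNat = m - 1 - k := by omega
      have e2 : (matsize - 1 - (k' : Int)).toNat = m - 1 - k' := by omega
      rw [e1, e2]
    rw [hA, pvOuter_eq value bw m mask t0 (by simp [ht0])
      (fun r hr' => by rw [List.eq_of_mem_replicate hr']; simp) m le_rfl]
    rw [pvRevFill_full m _ t0 (by simp [ht0])]
    simp only [make_tile_alt]
    rw [PySem.List.pyRange_zero, List.map_map]
    apply List.map_congr_left
    intro i hi
    rw [List.mem_range] at hi
    simp only [Function.comp]
    unfold pvRowF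
    rw [List.map_map]
    apply List.map_congr_left
    intro j hj
    rw [List.mem_range] at hj
    simp only [Function.comp]
    congr 1
    rw [← Int.shiftRight_add]
    have hcast : ((matsize - 1 - (i : Int)) * matsize + (matsize - 1 - (j : Int))) * bitwidth
        = ((((m - 1 - i) * m + (m - 1 - j)) * bw : Nat) : Int) := by
      have h1 : matsize - 1 - (i : Int) = ((m - 1 - i : Nat) : Int) := by omega
      have h2 : matsize - 1 - (j : Int) = ((m - 1 - j : Nat) : Int) := by omega
      rw [h1, h2, hbs, hms]; push_cast; ring
    rw [hcast, Int.toNat_natCast]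
    congr 1
    ring

-- ===== VERDICT (by name: the statement is the Claim_ definition above) =====
theorem make_tile_spec : Claim_equal_make_tile := by
  intro value bitwidth matsize _hdom hpre
  unfold Spec_make_tile
  exact make_tile_eq_alt value bitwidth matsize hpre
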